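-- pv_equiv track=rewrite | github.com/GhostDragonRaider/szabolcs-projektje | server.py | _months_from_slots
-- ===== SOURCE A (Python) =====
-- HONAPOK = {"01": "január", "02": "február", "03": "március", "04": "április", "05": "május",
--            "06": "június", "07": "július", "08": "augusztus", "09": "szeptember",
--            "10": "október", "11": "november", "12": "december"}
--
-- def _months_from_slots(slots: list) -> list[tuple[str, str]]:
--     """(yyyy-mm, megjelenített név) párok"""
--     seen = set()
--     out = []
--     for s in slots:
--         d = s.get("date", "")
--         if len(d) >= 7:
--             ym = d[:7]
--             if ym not in seen:
--                 seen.add(ym)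
--                 mn = d[5:7]
--                 out.append((ym, HONAPOK.get(mn, mn)))
--     return sorted(out)[:3]
-- ===== SOURCE B (Python) =====
-- HONAPOK = {"01": "január", "02": "február", "03": "március", "04": "április", "05": "május",
--            "06": "június", "07": "július", "08": "augusztus", "09": "szeptember",
--            "10": "október", "11": "november", "12": "december"}
--
-- def _months_from_slots(slots: list) -> list[tuple[str, str]]:
--     """(yyyy-mm, megjelenített név) párok"""
--     dates = sorted(s.get("date", "") for s in slots if len(s.get("date", "")) >= 7)
--     out = []
--     last = None
--     for d in dates:
--         ym = d[:7]
--         if ym != last: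
--             mn = d[5:7]
--             out.append((ym, HONAPOK.get(mn, mn)))
--             last = ym
--             if len(out) == 3:
--                 break
--     return out
-- ===== Notes on version B (the rewrite author's own statement) =====
-- stated objective: alternative
-- what changed: A dedups year-months in encounter order with a seen-set, then sorts the collected pairs and slices off three; B sorts the raw date strings first and makes one forward pass over the sorted sequence with only a last-seen variable (no set), emitting a pair whenever the 7-char prefix changes and breaking out as soon as three pairs are collected.
import Mathlib
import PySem

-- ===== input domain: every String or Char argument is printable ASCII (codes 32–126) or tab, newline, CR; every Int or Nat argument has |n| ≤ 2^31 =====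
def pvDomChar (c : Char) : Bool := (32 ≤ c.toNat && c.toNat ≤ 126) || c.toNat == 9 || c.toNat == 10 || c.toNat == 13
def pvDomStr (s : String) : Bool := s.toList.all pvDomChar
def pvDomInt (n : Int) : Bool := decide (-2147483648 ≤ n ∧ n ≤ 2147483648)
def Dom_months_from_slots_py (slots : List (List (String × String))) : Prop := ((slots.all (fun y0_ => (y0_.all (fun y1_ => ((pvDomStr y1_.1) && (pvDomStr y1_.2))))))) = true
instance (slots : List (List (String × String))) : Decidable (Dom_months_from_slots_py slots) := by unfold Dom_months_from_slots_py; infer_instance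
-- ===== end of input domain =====

-- B sorts the raw date strings first and then makes one forward pass with a last-seen variable
-- (no seen-set), emitting a pair at each new 7-char prefix and breaking after three (objective: alternative).

-- shared constant: the HONAPOK dict of both Python files
def pvHonapok : PySem.Dict String String :=
  PySem.Dict.mk [("01", "január"), ("02", "február"), ("03", "március"), ("04", "április"),
    ("05", "május"), ("06", "június"), ("07", "július"), ("08", "augusztus"),
    ("09", "szeptember"), ("10", "október"), ("11", "november"), ("12", "december")]

-- ===== PORT A =====
def months_from_slots_py (slots : List (List (String × String))) : List (String × String) :=
  let st := slots.foldl (fun (st : PySem.Set String × List (String × String)) s =>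
    let d := PySem.Dict.getD (PySem.Dict.mk s) "date" ""
    if 7 ≤ PySem.Str.len d then
      let ym := PySem.Str.slice d none (some 7)
      if PySem.Set.contains st.1 ym then st
      else
        let mn := PySem.Str.slice d (some 5) (some 7)
        (PySem.Set.add st.1 ym, st.2 ++ [(ym, PySem.Dict.getD pvHonapok mn mn)])
    else st) (PySem.Set.empty, [])
  PySem.List.slice (PySem.List.sorted2 st.2 Prod.fst Prod.snd false) none (some 3)

-- ===== PORT B =====
-- B's for-loop with `break`: one forward pass over the sorted dates, last-seen prefix, stop at 3
def pvLoopB : List String → Option String → List (String × String) → List (String × String)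
  | [], _, out => out
  | d :: rest, last, out =>
    let ym := PySem.Str.slice d none (some 7)
    if some ym ≠ last then
      let mn := PySem.Str.slice d (some 5) (some 7)
      let out' := out ++ [(ym, PySem.Dict.getD pvHonapok mn mn)]
      if out'.length = 3 then out' else pvLoopB rest (some ym) out'
    else pvLoopB rest last out

def months_from_slots_py_alt (slots : List (List (String × String))) : List (String × String) :=
  let dates := PySem.List.sorted
    ((slots.filter (fun s => 7 ≤ PySem.Str.len (PySem.Dict.getD (PySem.Dict.mk s) "date" ""))).map
      (fun s => PySem.Dict.getD (PySem.Dict.mk s) "date" "")) (fun x => x) false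
  pvLoopB dates none []

-- ===== PRECONDITION & SPEC =====
def Spec_months_from_slots_py (slots : List (List (String × String))) (out : List (String × String)) : Prop := out = months_from_slots_py_alt slots
instance (slots : List (List (String × String))) (out : List (String × String)) : Decidable (Spec_months_from_slots_py slots out) := by unfold Spec_months_from_slots_py; infer_instance

-- ===== CLAIM (what is proved, stated in full; the proofs are below) =====
def Claim_equal_months_from_slots_py : Prop := ∀ (slots : List (List (String × String))), Dom_months_from_slots_py slots → Spec_months_from_slots_py slots (months_from_slots_py slots)

-- ===== LEMMAS AND PROOFS =====

-- proof-only helpers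
def pvGet (s : List (String × String)) : String := PySem.Dict.getD (PySem.Dict.mk s) "date" ""

def pvPref (s : String) : String := PySem.Str.slice s none (some 7)

def pvPair (ym : String) : String × String :=
  (ym, PySem.Dict.getD pvHonapok (PySem.Str.slice ym (some 5) (some 7))
         (PySem.Str.slice ym (some 5) (some 7)))

def pvDates (slots : List (List (String × String))) : List String :=
  (slots.filter (fun s => 7 ≤ PySem.Str.len (pvGet s))).map pvGet

def pvYms (slots : List (List (String × String))) : List String :=
  (slots.filter (fun s => 7 ≤ PySem.Str.len (pvGet s))).map (fun s => pvPref (pvGet s))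

-- the run-heads of the 7-char prefixes of a date list, relative to a last-seen prefix
def pvHeads : Option String → List String → List String
  | _, [] => []
  | last, d :: rest =>
    let ym := pvPref d
    if some ym = last then pvHeads last rest else ym :: pvHeads (some ym) rest

-- A's loop body as a named function (definitionally the lambda in the port)
def pvStep (st : PySem.Set String × List (String × String)) (s : List (String × String)) :
    PySem.Set String × List (String × String) :=
  let d := PySem.Dict.getD (PySem.Dict.mk s) "date" ""
  if 7 ≤ PySem.Str.len d then
    let ym := PySem.Str.slice d none (some 7)
    if PySem.Set.contains st.1 ym then st
    else
      let mn := PySem.Str.slice d (some 5) (some 7)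
      (PySem.Set.add st.1 ym, st.2 ++ [(ym, PySem.Dict.getD pvHonapok mn mn)])
  else st

theorem pv_foldA (slots : List (List (String × String))) :
    months_from_slots_py slots =
      PySem.List.slice (PySem.List.sorted2 (slots.foldl pvStep (PySem.Set.empty, [])).2
        Prod.fst Prod.snd false) none (some 3) := rfl

theorem pvStep_eq (st : PySem.Set String × List (String × String)) (s : List (String × String)) :
    pvStep st s =
      if 7 ≤ PySem.Str.len (pvGet s) then
        (if PySem.Set.contains st.1 (pvPref (pvGet s)) = true then st
         else (PySem.Set.add st.1 (pvPref (pvGet s)),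
               st.2 ++ [(pvPref (pvGet s),
                 PySem.Dict.getD pvHonapok (PySem.Str.slice (pvGet s) (some 5) (some 7))
                   (PySem.Str.slice (pvGet s) (some 5) (some 7)))]))
      else st := rfl

-- d[:7] as a character list
theorem pv_toList_pref (d : String) : (pvPref d).toList = d.toList.take 7 := by
  simp only [pvPref, PySem.Str.slice, PySem.Chars.slice, String.toList_ofList]
  rw [show ((7:ℤ)) = ((7:ℕ):ℤ) by norm_num, PySem.List.slice_to_natCast]

-- d[:7][5:7] = d[5:7]
theorem pv_slice_slice (d : String) :
    PySem.Str.slice (pvPref d) (some 5) (some 7) = PySem.Str.slice d (some 5) (some 7) := by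
  simp only [pvPref, PySem.Str.slice, PySem.Chars.slice, String.toList_ofList]
  apply congrArg
  rw [show ((7:ℤ)) = ((7:ℕ):ℤ) by norm_num, show ((5:ℤ)) = ((5:ℕ):ℤ) by norm_num,
      PySem.List.slice_to_natCast, PySem.List.slice_natCast, PySem.List.slice_natCast]
  norm_num [List.drop_take]

theorem pvPair_slice (d : String) :
    pvPair (pvPref d) =
      (pvPref d,
        PySem.Dict.getD pvHonapok (PySem.Str.slice d (some 5) (some 7)) (PySem.Str.slice d (some 5) (some 7))) := by
  simp [pvPair, pv_slice_slice]

-- ----- A's side: loop invariant (A = take 3 of the sorted distinct prefixes, paired) -----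

theorem pv_mem_insertBy {α : Type} (c : α → α → Bool) (x : α) (acc : List α) (y : α) :
    y ∈ PySem.List.insertBy c x acc ↔ y = x ∨ y ∈ acc := by
  induction acc with
  | nil => simp [PySem.List.insertBy]
  | cons a t ih =>
    by_cases h : c x a = true
    · simp [PySem.List.insertBy, h]
      try tauto
    · simp [PySem.List.insertBy, h, ih]
      try tauto

theorem pv_insertBy_congr {α : Type} (c c' : α → α → Bool) (x : α) (acc : List α)
    (h : ∀ b ∈ acc, c x b = c' x b) : PySem.List.insertBy c x acc = PySem.List.insertBy c' x acc := by
  induction acc with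
  | nil => rfl
  | cons a t ih =>
    have hx : c x a = c' x a := h a (by simp)
    by_cases hc : c x a = true
    · simp [PySem.List.insertBy, hc, hx ▸ hc]
    · have hc' : ¬ c' x a = true := by rw [← hx]; exact hc
      simp [PySem.List.insertBy, hc, hc', ih (fun b hb => h b (by simp [hb]))]

theorem pv_foldl_insertBy_congr {α : Type} (c c' : α → α → Bool) (S : List α)
    (h : ∀ a ∈ S, ∀ b ∈ S, c a b = c' a b) :
    ∀ (xs acc : List α), (∀ a ∈ xs, a ∈ S) → (∀ b ∈ acc, b ∈ S) →
      xs.foldl (fun acc x => PySem.List.insertBy c x acc) acc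
        = xs.foldl (fun acc x => PySem.List.insertBy c' x acc) acc := by
  intro xs
  induction xs with
  | nil => intro acc _ _; rfl
  | cons x t ih =>
    intro acc hxs hacc
    have hxS : x ∈ S := hxs x (by simp)
    simp only [List.foldl_cons]
    rw [pv_insertBy_congr c c' x acc (fun b hb => h x hxS b (hacc b hb))]
    exact ih _ (fun a ha => hxs a (by simp [ha]))
      (fun b hb => by
        rcases (pv_mem_insertBy c' x acc b).1 hb with h1 | h1
        · exact h1 ▸ hxS
        · exact hacc b h1)

-- on a list whose first components determine its elements, A's pair sort is a sort by first component
theorem pv_sorted2_fst (L : List (String × String))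
    (h : ∀ a ∈ L, ∀ b ∈ L, a.1 = b.1 → a = b) :
    PySem.List.sorted2 L Prod.fst Prod.snd false = PySem.List.sorted L Prod.fst false := by
  show L.foldl (fun acc x => PySem.List.insertBy _ x acc) [] = L.foldl (fun acc x => PySem.List.insertBy _ x acc) []
  apply pv_foldl_insertBy_congr _ _ L _ L [] (fun a ha => ha) (by simp)
  intro a ha b hb
  rcases lt_trichotomy a.1 b.1 with hlt | heq | hgt
  · simp [hlt, not_lt.2 (le_of_lt hlt)]
  · have : a = b := h a ha b hb heq
    subst this
    simp
  · simp [hgt, not_lt.2 (le_of_lt hgt)]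

theorem pv_ofList_append (ys zs : List String) :
    PySem.Set.ofList (ys ++ zs) = zs.foldl PySem.Set.add (PySem.Set.ofList ys) := by
  rw [PySem.Set.ofList_eq_foldl, PySem.Set.ofList_eq_foldl, List.foldl_append]

-- A's loop invariant
theorem pv_loopA (slots : List (List (String × String))) :
    ∀ ys : List String,
      slots.foldl pvStep (PySem.Set.ofList ys, List.map pvPair (PySem.Set.ofList ys))
      = (PySem.Set.ofList (ys ++ pvYms slots), List.map pvPair (PySem.Set.ofList (ys ++ pvYms slots))) := by
  induction slots with
  | nil => intro ys; simp [pvYms]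
  | cons s rest ih =>
    intro ys
    rw [List.foldl_cons, pvStep_eq]
    by_cases hv : 7 ≤ PySem.Str.len (pvGet s)
    · rw [if_pos hv]
      set ym := pvPref (pvGet s) with hym
      have hyms : pvYms (s :: rest) = ym :: pvYms rest := by
        simp only [pvYms]
        rw [List.filter_cons_of_pos (by simpa using hv), List.map_cons]
      have hofl : PySem.Set.ofList (ys ++ [ym]) = PySem.Set.add (PySem.Set.ofList ys) ym := by
        rw [pv_ofList_append]; rfl
      have hkey : PySem.Set.ofList ((ys ++ [ym]) ++ pvYms rest) = PySem.Set.ofList (ys ++ ym :: pvYms rest) := by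
        rw [pv_ofList_append (ys ++ [ym]) (pvYms rest), hofl, pv_ofList_append ys (ym :: pvYms rest), List.foldl_cons]
      rw [hyms]
      by_cases hc : PySem.Set.contains (PySem.Set.ofList ys) ym = true
      · rw [if_pos hc]
        have hadd : PySem.Set.add (PySem.Set.ofList ys) ym = PySem.Set.ofList ys := by
          unfold PySem.Set.add; rw [if_pos hc]
        have h := ih (ys ++ [ym])
        rw [hofl, hadd, hkey] at h
        exact h
      · rw [if_neg hc]
        have hadds : PySem.Set.add (PySem.Set.ofList ys) ym = PySem.Set.ofList ys ++ [ym] := by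
          unfold PySem.Set.add; rw [if_neg hc]
        have hpair : List.map pvPair (PySem.Set.ofList ys) ++
            [(ym, PySem.Dict.getD pvHonapok (PySem.Str.slice (pvGet s) (some 5) (some 7))
                    (PySem.Str.slice (pvGet s) (some 5) (some 7)))]
            = List.map pvPair (PySem.Set.ofList (ys ++ [ym])) := by
          rw [hofl, hadds, List.map_append]
          simp only [List.map_cons, List.map_nil]
          rw [hym, pvPair_slice (pvGet s)]
        rw [hpair, ← hofl]
        have h := ih (ys ++ [ym])
        rw [hkey] at h
        exact h
    · rw [if_neg hv]
      have hyms : pvYms (s :: rest) = pvYms rest := by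
        simp only [pvYms]
        rw [List.filter_cons_of_neg (by simpa using hv)]
      rw [hyms]
      exact ih ys

theorem pv_pvPair_fst (x : String) : (pvPair x).1 = x := rfl

-- A's value, in the common normal form
theorem pv_A_normal (slots : List (List (String × String))) :
    months_from_slots_py slots =
      List.take 3 (List.map pvPair (PySem.List.sorted (PySem.Set.ofList (pvYms slots)) (fun x => x) false)) := by
  have h0 : slots.foldl pvStep (PySem.Set.empty, ([] : List (String × String)))
      = (PySem.Set.ofList (pvYms slots), List.map pvPair (PySem.Set.ofList (pvYms slots))) := by
    have h := pv_loopA slots []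
    rw [List.nil_append] at h
    exact h
  have h2 : (slots.foldl pvStep (PySem.Set.empty, ([] : List (String × String)))).2
      = List.map pvPair (PySem.Set.ofList (pvYms slots)) := by rw [h0]
  have hinj : ∀ a ∈ List.map pvPair (PySem.Set.ofList (pvYms slots)),
      ∀ b ∈ List.map pvPair (PySem.Set.ofList (pvYms slots)), a.1 = b.1 → a = b := by
    intro a ha b hb hab
    rcases List.mem_map.1 ha with ⟨u, _, rfl⟩
    rcases List.mem_map.1 hb with ⟨v, _, rfl⟩
    rw [pv_pvPair_fst, pv_pvPair_fst] at hab
    rw [hab]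
  have hsort : PySem.List.sorted (List.map pvPair (PySem.Set.ofList (pvYms slots))) Prod.fst false
      = List.map pvPair (PySem.List.sorted (PySem.Set.ofList (pvYms slots)) (fun x => x) false) := by
    apply PySem.List.sorted_eq_of_perm_of_pairwise_lt
    · exact List.Perm.map pvPair (PySem.List.sorted_perm _ _ _)
    · rw [List.pairwise_map]
      simp only [pv_pvPair_fst]
      exact PySem.List.sorted_ofList_pairwise_lt (pvYms slots)
  rw [pv_foldA, h2, pv_sorted2_fst _ hinj, hsort,
      show ((3:ℤ)) = ((3:ℕ):ℤ) by norm_num,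
      PySem.List.slice_to_natCast]

-- ----- B's side -----

-- prefix-taking is monotone for the lexicographic order
theorem pv_take_lex {l₁ l₂ : List Char} (n : Nat) (h : List.Lex (· < ·) (l₁.take n) (l₂.take n)) :
    List.Lex (· < ·) l₁ l₂ := by
  induction n generalizing l₁ l₂ with
  | zero => simp at h
  | succ n ih =>
    cases l₁ with
    | nil =>
      cases l₂ with
      | nil => simp at h
      | cons b t₂ => exact List.Lex.nil
    | cons a t₁ =>
      cases l₂ with
      | nil => simp at h
      | cons b t₂ =>
        simp only [List.take_succ_cons] at h
        cases h with
        | rel hr => exact List.Lex.rel hr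
        | cons hrest => exact List.Lex.cons (ih hrest)

theorem pv_pref_mono {a b : String} (h : a ≤ b) : pvPref a ≤ pvPref b := by
  rw [String.le_iff_toList_le] at h ⊢
  rw [pv_toList_pref, pv_toList_pref]
  by_contra hcon
  have hlt : (pvPref b).toList < (pvPref a).toList := not_le.1 (by
    rw [pv_toList_pref, pv_toList_pref]; exact hcon)
  rw [pv_toList_pref, pv_toList_pref] at hlt
  exact absurd (le_of_lt (pv_take_lex 7 hlt : List.Lex (· < ·) b.toList a.toList)) (not_le.2 (lt_of_le_of_lt (le_refl _) (lt_of_le_of_ne h (by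
    intro he
    exact absurd hlt (by rw [he]; exact lt_irrefl _)))))

-- run-heads of a prefix-sorted list, below a strict lower bound
theorem pv_heads_core : ∀ (L : List String), L.Pairwise (fun a b => pvPref a ≤ pvPref b) →
    ∀ l : String, (∀ d ∈ L, l ≤ pvPref d) →
      ((pvHeads (some l) L).Pairwise (· < ·)
        ∧ (∀ x ∈ pvHeads (some l) L, l < x ∧ x ∈ L.map pvPref)
        ∧ (∀ d ∈ L, pvPref d = l ∨ pvPref d ∈ pvHeads (some l) L)) := by
  intro L
  induction L with
  | nil => intro _ l _; refine ⟨List.Pairwise.nil, by simp [pvHeads], by simp⟩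
  | cons d rest ih =>
    intro hP l hl
    have hPd : ∀ b ∈ rest, pvPref d ≤ pvPref b := (List.pairwise_cons.1 hP).1
    have hPrest : rest.Pairwise (fun a b => pvPref a ≤ pvPref b) := (List.pairwise_cons.1 hP).2
    by_cases hc : some (pvPref d) = some l
    · have hdl : pvPref d = l := Option.some_injective _ hc
      have hrec := ih hPrest l (fun b hb => hdl ▸ hPd b hb)
      have hunf : pvHeads (some l) (d :: rest) = pvHeads (some l) rest := by
        simp [pvHeads, hc]
      refine ⟨hunf ▸ hrec.1, ?_, ?_⟩
      · intro x hx
        rw [hunf] at hx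
        exact ⟨(hrec.2.1 x hx).1, List.mem_cons_of_mem _ ((hrec.2.1 x hx).2)⟩
      · intro b hb
        rcases List.mem_cons.1 hb with rfl | hb'
        · exact Or.inl hdl
        · rcases hrec.2.2 b hb' with h1 | h1
          · exact Or.inl h1
          · exact Or.inr (hunf ▸ h1)
    · have hld : l < pvPref d :=
        lt_of_le_of_ne (hl d (by simp)) (fun he => hc (by rw [he]))
      have hrec := ih hPrest (pvPref d) hPd
      have hunf : pvHeads (some l) (d :: rest) = pvPref d :: pvHeads (some (pvPref d)) rest := by
        simp [pvHeads, hc]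
      refine ⟨?_, ?_, ?_⟩
      · rw [hunf]
        exact List.pairwise_cons.2 ⟨fun x hx => (hrec.2.1 x hx).1, hrec.1⟩
      · intro x hx
        rw [hunf] at hx
        rcases List.mem_cons.1 hx with rfl | hx'
        · exact ⟨hld, by simp⟩
        · exact ⟨lt_trans hld (hrec.2.1 x hx').1,
            List.mem_cons_of_mem _ ((hrec.2.1 x hx').2)⟩
      · intro b hb
        rcases List.mem_cons.1 hb with rfl | hb'
        · exact Or.inr (hunf ▸ List.mem_cons_self)
        · rcases hrec.2.2 b hb' with h1 | h1
          · exact Or.inr (hunf ▸ (h1 ▸ List.mem_cons_self))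
          · exact Or.inr (hunf ▸ List.mem_cons_of_mem _ h1)

theorem pv_heads_none (L : List String) (hP : L.Pairwise (fun a b => pvPref a ≤ pvPref b)) :
    ((pvHeads none L).Pairwise (· < ·)) ∧ (∀ x, x ∈ pvHeads none L ↔ x ∈ L.map pvPref) := by
  cases L with
  | nil => exact ⟨List.Pairwise.nil, by simp [pvHeads]⟩
  | cons d rest =>
    have hPd : ∀ b ∈ rest, pvPref d ≤ pvPref b := (List.pairwise_cons.1 hP).1
    have hPrest : rest.Pairwise (fun a b => pvPref a ≤ pvPref b) := (List.pairwise_cons.1 hP).2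
    have hrec := pv_heads_core rest hPrest (pvPref d) hPd
    have hunf : pvHeads none (d :: rest) = pvPref d :: pvHeads (some (pvPref d)) rest := by
      simp [pvHeads]
    refine ⟨?_, ?_⟩
    · rw [hunf]
      exact List.pairwise_cons.2 ⟨fun x hx => (hrec.2.1 x hx).1, hrec.1⟩
    · intro x
      rw [hunf]
      constructor
      · intro hx
        rcases List.mem_cons.1 hx with rfl | hx'
        · simp
        · exact List.mem_cons_of_mem _ ((hrec.2.1 x hx').2)
      · intro hx
        rcases List.mem_cons.1 hx with rfl | hx'
        · exact List.mem_cons_self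
        · rcases List.mem_map.1 hx' with ⟨b, hb, rfl⟩
          rcases hrec.2.2 b hb with h1 | h1
          · exact h1 ▸ List.mem_cons_self
          · exact List.mem_cons_of_mem _ h1

-- B's loop computes take 3 of the paired run-heads
theorem pv_loopB_eq : ∀ (L : List String) (last : Option String) (out : List (String × String)),
    out.length < 3 →
    pvLoopB L last out = List.take 3 (out ++ (pvHeads last L).map pvPair) := by
  intro L
  induction L with
  | nil =>
    intro last out h
    simp [pvLoopB, pvHeads, List.take_of_length_le (Nat.le_of_lt h)]
  | cons d rest ih =>
    intro last out h
    by_cases hc : some (pvPref d) = last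
    · have hL : pvLoopB (d :: rest) last out = pvLoopB rest last out := by
        simp [pvLoopB, pvPref] at hc ⊢
        simp [hc]
      have hH : pvHeads last (d :: rest) = pvHeads last rest := by
        simp [pvHeads, hc]
      rw [hL, hH, ih last out h]
    · have hpair : (pvPref d, PySem.Dict.getD pvHonapok (PySem.Str.slice d (some 5) (some 7))
          (PySem.Str.slice d (some 5) (some 7))) = pvPair (pvPref d) := (pvPair_slice d).symm
      have hL : pvLoopB (d :: rest) last out =
          (if (out ++ [pvPair (pvPref d)]).length = 3 then out ++ [pvPair (pvPref d)]
           else pvLoopB rest (some (pvPref d)) (out ++ [pvPair (pvPref d)])) := by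
        simp only [pvLoopB]
        rw [show PySem.Str.slice d none (some 7) = pvPref d from rfl, if_pos (by simpa using hc), hpair]
      have hH : pvHeads last (d :: rest) = pvPref d :: pvHeads (some (pvPref d)) rest := by
        simp [pvHeads, hc]
      rw [hL, hH]
      by_cases h3 : (out ++ [pvPair (pvPref d)]).length = 3
      · rw [if_pos h3]
        rw [List.map_cons, show out ++ pvPair (pvPref d) :: (pvHeads (some (pvPref d)) rest).map pvPair
              = (out ++ [pvPair (pvPref d)]) ++ (pvHeads (some (pvPref d)) rest).map pvPair by simp]
        rw [List.take_append_of_le_length (by omega), List.take_of_length_le (by omega)]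
      · rw [if_neg h3]
        have hlen : (out ++ [pvPair (pvPref d)]).length < 3 := by
          simp only [List.length_append, List.length_cons, List.length_nil] at h3 ⊢
          omega
        rw [ih (some (pvPref d)) _ hlen]
        simp
  
-- B's value, in the common normal form
theorem pv_B_normal (slots : List (List (String × String))) :
    months_from_slots_py_alt slots =
      List.take 3 (List.map pvPair (PySem.List.sorted (PySem.Set.ofList (pvYms slots)) (fun x => x) false)) := by
  have hD : months_from_slots_py_alt slots
      = pvLoopB (PySem.List.sorted (pvDates slots) (fun x => x) false) none [] := rfl
  set D := PySem.List.sorted (pvDates slots) (fun x => x) false with hDdef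
  have hP : D.Pairwise (fun a b => pvPref a ≤ pvPref b) :=
    (PySem.List.sorted_pairwise (pvDates slots) (fun x => x) : _).imp (fun h => pv_pref_mono h)
  have hheads := pv_heads_none D hP
  have hperm : (pvHeads none D).Perm (PySem.Set.ofList (pvYms slots)) := by
    refine (List.perm_ext_iff_of_nodup ?_ (PySem.Set.nodup_ofList _)).2 ?_
    · exact List.Pairwise.imp (fun h => ne_of_lt h) hheads.1
    · intro x
      rw [hheads.2 x, PySem.Set.mem_ofList]
      have hmy : pvYms slots = (pvDates slots).map pvPref := by
        simp [pvYms, pvDates, List.map_map]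
      rw [hmy]
      exact (List.Perm.map pvPref (PySem.List.sorted_perm (pvDates slots) (fun x => x) false)).mem_iff
  have hsorted : PySem.List.sorted (PySem.Set.ofList (pvYms slots)) (fun x => x) false = pvHeads none D :=
    PySem.List.sorted_eq_of_perm_of_pairwise_lt _ _ _ hperm hheads.1
  rw [hD, pv_loopB_eq D none [] (by simp), List.nil_append, hsorted]

-- ===== VERDICT (by name: the statement is the Claim_ definition above) =====
theorem months_from_slots_py_spec : Claim_equal_months_from_slots_py := by
  intro slots _
  show months_from_slots_py slots = months_from_slots_py_alt slots
  rw [pv_A_normal, pv_B_normal]
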